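-- pv_equiv track=rewrite | github.com/qibinc/leetcode | contests/259/2.py | sumOfBeauties
-- ===== SOURCE A (Python) =====
-- from typing import List
--
-- def sumOfBeauties(nums: List[int]) -> int:
--     suf_min = [nums[-1]]
--     for num in reversed(nums[:-1]):
--         suf_min.append(min(suf_min[-1], num))
--     suf_min = suf_min[::-1]
--     pref_max = nums[0]
--     ans = 0
--     for idx, num in list(enumerate(nums))[1:-1]:
--         if pref_max < num and num < suf_min[idx + 1]:
--             ans += 2
--         elif nums[idx - 1] < num and num < nums[idx + 1]:
--             ans += 1
--         pref_max = max(pref_max, num)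
--     return ans
-- ===== SOURCE B (Python) =====
-- from typing import List
--
-- def sumOfBeauties(nums: List[int]) -> int:
--     # Score as a SUM of two independent counts: being a strict prefix-max-and-
--     # suffix-min (the "global" condition) implies the local a<b<c condition, so
--     # A's 2/1/0 branch equals [local] + [global].
--     local = 0
--     for a, b, c in zip(nums, nums[1:], nums[2:]):
--         if a < b and b < c:
--             local += 1
--     # flags[i]: nums[i] strictly exceeds every earlier element
--     flags = [False]
--     m = nums[0]
--     for x in nums[1:]:
--         flags.append(m < x)
--         m = max(m, x)
--     # backward scalar scan maintaining the running suffix minimum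
--     g = 0
--     m = nums[-1]
--     for i, x in reversed(list(enumerate(nums))[1:-1]):
--         if x < m and flags[i]:
--             g += 1
--         m = min(m, x)
--     return local + g
-- ===== Notes on version B (the rewrite author's own statement) =====
-- stated objective: alternative
-- what changed: A scores each interior index 2/1/0 in one branch inside a single loop carrying a running prefix-max; B decomposes the score additively into two independent counts (local a<b<c over consecutive triples, plus a global count from a strict-left-maximum flag pass and a backward scalar suffix-min scan), relying on the fact that the global condition implies the local one.
import Mathlib
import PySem

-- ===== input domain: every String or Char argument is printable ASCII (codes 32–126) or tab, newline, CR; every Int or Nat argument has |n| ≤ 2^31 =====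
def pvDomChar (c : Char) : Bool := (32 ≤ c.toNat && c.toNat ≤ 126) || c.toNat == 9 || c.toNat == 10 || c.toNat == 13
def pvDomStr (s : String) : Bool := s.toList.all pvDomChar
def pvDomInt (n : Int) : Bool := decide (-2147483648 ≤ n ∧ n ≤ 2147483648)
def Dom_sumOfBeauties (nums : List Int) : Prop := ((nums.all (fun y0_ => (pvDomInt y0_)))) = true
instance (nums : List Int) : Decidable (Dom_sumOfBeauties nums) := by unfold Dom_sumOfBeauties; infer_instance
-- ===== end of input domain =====

-- B replaces A's single-loop 2/1/0 scoring by two independent counts summed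
-- (local triples + global strict-extremum indices); same O(n) cost (objective: alternative).

-- ===== PORT A =====
-- A builds suf_min by appending and reverses it once at the end; consing at the
-- front builds that final reversed list directly.
def sumOfBeauties (nums : List Int) : Int :=
  let sufMin : List Int :=
    ((PySem.List.slice nums none (some (-1))).reverse).foldl
      (fun acc num => min (acc.headD 0) num :: acc) [PySem.List.pyGetD nums (-1) 0]
  let pairs := PySem.List.slice (PySem.List.enumerate nums) (some 1) (some (-1))
  (pairs.foldl
    (fun st p =>
      (max st.1 p.2,
       if st.1 < p.2 ∧ p.2 < PySem.List.pyGetD sufMin (p.1 + 1) 0 then st.2 + 2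
       else if PySem.List.pyGetD nums (p.1 - 1) 0 < p.2 ∧ p.2 < PySem.List.pyGetD nums (p.1 + 1) 0 then st.2 + 1
       else st.2))
    (PySem.List.pyGetD nums 0 0, 0)).2

-- ===== PORT B =====
-- flags.append(b) is ported literally as acc ++ [b]; the backward loop iterates
-- the reversed enumerate slice exactly as Source B does.
def sumOfBeauties_alt (nums : List Int) : Int :=
  let localCnt : Int :=
    (nums.zip ((PySem.List.slice nums (some 1) none).zip (PySem.List.slice nums (some 2) none))).foldl
      (fun acc t => if t.1 < t.2.1 ∧ t.2.1 < t.2.2 then acc + 1 else acc) 0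
  let flags : List Bool :=
    ((PySem.List.slice nums (some 1) none).foldl
      (fun st x => (st.1 ++ [decide (st.2 < x)], max st.2 x))
      ([false], PySem.List.pyGetD nums 0 0)).1
  let g : Int :=
    (((PySem.List.slice (PySem.List.enumerate nums) (some 1) (some (-1))).reverse).foldl
      (fun st p =>
        (min st.1 p.2,
         if p.2 < st.1 ∧ PySem.List.pyGetD flags p.1 false = true then st.2 + 1 else st.2))
      (PySem.List.pyGetD nums (-1) 0, 0)).2
  localCnt + g

-- ===== PRECONDITION & SPEC =====
-- A raises IndexError (nums[-1]) on the empty list; Pre_ excludes exactly that input.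
def Pre_sumOfBeauties (nums : List Int) : Prop := nums ≠ []
instance (nums : List Int) : Decidable (Pre_sumOfBeauties nums) := by unfold Pre_sumOfBeauties; infer_instance
def pvWitness_sumOfBeauties : List Int := [2, 1, 3]
def Spec_sumOfBeauties (nums : List Int) (out : Int) : Prop := out = sumOfBeauties_alt nums
instance (nums : List Int) (out : Int) : Decidable (Spec_sumOfBeauties nums out) := by unfold Spec_sumOfBeauties; infer_instance

-- ===== CLAIM (what is proved, stated in full; the proofs are below) =====
def Claim_equal_sumOfBeauties : Prop := ∀ (nums : List Int), Dom_sumOfBeauties nums → Pre_sumOfBeauties nums → Spec_sumOfBeauties nums (sumOfBeauties nums)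

-- ===== LEMMAS AND PROOFS =====

-- proof-only helpers
def pvLeft (nums : List Int) : List Int :=
  List.scanl max (PySem.List.pyGetD nums 0 0) nums.tail

def pvSuf (nums : List Int) : List Int :=
  ((PySem.List.slice nums none (some (-1))).reverse).foldl
    (fun acc x => min (acc.headD 0) x :: acc) [PySem.List.pyGetD nums (-1) 0]

def pvStep (nums : List Int) (st : Int × Int) (i : Int) : Int × Int :=
  (max st.1 (PySem.List.pyGetD nums i 0),
   if st.1 < PySem.List.pyGetD nums i 0 ∧ PySem.List.pyGetD nums i 0 < PySem.List.pyGetD (pvSuf nums) (i + 1) 0 then st.2 + 2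
   else if PySem.List.pyGetD nums (i - 1) 0 < PySem.List.pyGetD nums i 0 ∧ PySem.List.pyGetD nums i 0 < PySem.List.pyGetD nums (i + 1) 0 then st.2 + 1
   else st.2)

def pvTerm (nums : List Int) (i : Int) : Int :=
  if PySem.List.pyGetD (pvLeft nums) (i - 1) 0 < PySem.List.pyGetD nums i 0 ∧
     PySem.List.pyGetD nums i 0 < PySem.List.pyGetD (pvSuf nums) (i + 1) 0 then 2
  else if PySem.List.pyGetD nums (i - 1) 0 < PySem.List.pyGetD nums i 0 ∧
          PySem.List.pyGetD nums i 0 < PySem.List.pyGetD nums (i + 1) 0 then 1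
  else 0

def pvLocal (nums : List Int) (i : Int) : Int :=
  if PySem.List.pyGetD nums (i - 1) 0 < PySem.List.pyGetD nums i 0 ∧
     PySem.List.pyGetD nums i 0 < PySem.List.pyGetD nums (i + 1) 0 then 1 else 0

def pvGlob (nums : List Int) (i : Int) : Int :=
  if PySem.List.pyGetD (pvLeft nums) (i - 1) 0 < PySem.List.pyGetD nums i 0 ∧
     PySem.List.pyGetD nums i 0 < PySem.List.pyGetD (pvSuf nums) (i + 1) 0 then 1 else 0

-- ---------- A side (fold = sum of pvTerm over the interior range) ----------

lemma scanl_getD_zero (f : Int → Int → Int) (a : Int) (l : List Int) :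
    (List.scanl f a l).getD 0 0 = a := by
  cases l <;> simp

lemma scanl_getD_succ (f : Int → Int → Int) :
    ∀ (l : List Int) (a : Int) (j : Nat), j < l.length →
      (List.scanl f a l).getD (j + 1) 0 = f ((List.scanl f a l).getD j 0) (l.getD j 0) := by
  intro l
  induction l with
  | nil => intro a j h; simp at h
  | cons x t ih =>
    intro a j h
    cases j with
    | zero =>
      rw [List.scanl_cons, List.getD_cons_succ, List.getD_cons_zero, List.getD_cons_zero,
          scanl_getD_zero]
    | succ j' =>
      rw [List.scanl_cons]
      simp only [List.getD_cons_succ]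
      exact ih (f a x) j' (by simpa using h)

lemma pvLeft_getD_zero (nums : List Int) :
    (pvLeft nums).getD 0 0 = nums.getD 0 0 := by
  rw [pvLeft, scanl_getD_zero, PySem.List.pyGetD_of_nonneg nums 0 (le_refl 0)]
  simp

lemma pvLeft_getD_succ (nums : List Int) (j : Nat) (hj : j + 1 < nums.length) :
    (pvLeft nums).getD (j + 1) 0 = max ((pvLeft nums).getD j 0) (nums.getD (j + 1) 0) := by
  cases nums with
  | nil => simp at hj
  | cons x t =>
    have ht : j < t.length := by simpa using hj
    have := scanl_getD_succ max t (PySem.List.pyGetD (x :: t) 0 0) j ht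
    simpa [pvLeft] using this

lemma slice_map {α β : Type} (g : α → β) (l : List α) (a b : Option Int) :
    PySem.List.slice (l.map g) a b = (PySem.List.slice l a b).map g := by
  simp [PySem.List.slice, List.map_take, List.map_drop]

lemma slice_one_neg_one {α : Type} (l : List α) :
    PySem.List.slice l (some 1) (some (-1)) = l.tail.dropLast := by
  rcases l with _ | ⟨x, t⟩
  · rfl
  · have h : ¬((t.length : Int) < 0) := by omega
    simp [PySem.List.slice, PySem.List.clampIdx, h, List.dropLast_eq_take]

lemma tail_dropLast_pyRange (n : Int) (h : 1 ≤ n) :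
    (PySem.List.pyRange 0 n 1).tail.dropLast = PySem.List.pyRange 1 (n - 1) 1 := by
  rw [PySem.List.pyRange_one_cons (by omega)]
  rcases eq_or_lt_of_le h with h1 | h1
  · simp [← h1, PySem.List.pyRange_one_eq_nil]
  · have hn : n = (n - 1) + 1 := by omega
    rw [List.tail_cons, hn, PySem.List.pyRange_one_succ_right (by omega)]
    simp

lemma pairs_eq (nums : List Int) (h : nums ≠ []) :
    PySem.List.slice (PySem.List.enumerate nums) (some 1) (some (-1))
      = (PySem.List.pyRange 1 ((nums.length : Int) - 1) 1).map
          (fun i => (i, PySem.List.pyGetD nums i 0)) := by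
  have hlen : 1 ≤ (nums.length : Int) := by
    have := List.length_pos_of_ne_nil h
    omega
  rw [PySem.List.enumerate_eq_map_pyRange nums 0, slice_map, slice_one_neg_one]
  simp only [PySem.List.len_eq]
  rw [tail_dropLast_pyRange _ hlen]

lemma pvStep_at (nums : List Int) (s ans : Int) (h1 : 1 ≤ s)
    (h2 : s < (nums.length : Int) - 1) :
    pvStep nums (PySem.List.pyGetD (pvLeft nums) (s - 1) 0, ans) s
      = (PySem.List.pyGetD (pvLeft nums) (s + 1 - 1) 0, ans + pvTerm nums s) := by
  have hs : s + 1 - 1 = s := by ring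
  rw [hs]
  have hfst : max (PySem.List.pyGetD (pvLeft nums) (s - 1) 0) (PySem.List.pyGetD nums s 0)
      = PySem.List.pyGetD (pvLeft nums) s 0 := by
    rw [PySem.List.pyGetD_of_nonneg _ _ (by omega : (0:Int) ≤ s - 1),
        PySem.List.pyGetD_of_nonneg _ _ (by omega : (0:Int) ≤ s),
        PySem.List.pyGetD_of_nonneg _ _ (by omega : (0:Int) ≤ s)]
    have hj : s.toNat = (s - 1).toNat + 1 := by omega
    rw [hj, pvLeft_getD_succ nums ((s - 1).toNat) (by omega)]
  unfold pvStep pvTerm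
  rw [Prod.mk.injEq]
  refine ⟨hfst, ?_⟩
  split_ifs <;> ring

lemma main_loop (nums : List Int) :
    ∀ (k : Nat) (s ans : Int), 1 ≤ s → s + k = (nums.length : Int) - 1 →
      ((PySem.List.pyRange s ((nums.length : Int) - 1) 1).foldl (pvStep nums)
          (PySem.List.pyGetD (pvLeft nums) (s - 1) 0, ans)).2
        = ans + ((PySem.List.pyRange s ((nums.length : Int) - 1) 1).map (pvTerm nums)).sum := by
  intro k
  induction k with
  | zero =>
    intro s ans hs hk
    rw [PySem.List.pyRange_one_eq_nil (by omega)]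
    simp
  | succ k ih =>
    intro s ans hs hk
    have hslt : s < (nums.length : Int) - 1 := by omega
    rw [PySem.List.pyRange_one_cons hslt]
    simp only [List.foldl_cons, List.map_cons, List.sum_cons]
    rw [pvStep_at nums s ans hs hslt,
        ih (s + 1) (ans + pvTerm nums s) (by omega) (by omega)]
    ring

lemma A_eq_sum (nums : List Int) (h : nums ≠ []) :
    sumOfBeauties nums
      = ((PySem.List.pyRange 1 ((nums.length : Int) - 1) 1).map (pvTerm nums)).sum := by
  simp only [sumOfBeauties]
  rw [pairs_eq nums h, List.foldl_map]
  show ((PySem.List.pyRange 1 ((nums.length : Int) - 1) 1).foldl (pvStep nums)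
          (PySem.List.pyGetD nums 0 0, 0)).2
      = ((PySem.List.pyRange 1 ((nums.length : Int) - 1) 1).map (pvTerm nums)).sum
  have h0 : PySem.List.pyGetD nums 0 0 = PySem.List.pyGetD (pvLeft nums) (1 - 1) 0 := by
    rw [show (1:Int) - 1 = 0 from rfl,
        PySem.List.pyGetD_of_nonneg (pvLeft nums) 0 (le_refl (0:Int)),
        PySem.List.pyGetD_of_nonneg nums 0 (le_refl (0:Int))]
    have hz := pvLeft_getD_zero nums
    simp only [List.getD_eq_getElem?_getD] at hz
    simp [hz]
  rw [h0]
  rcases Nat.lt_or_ge nums.length 2 with h2 | h2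
  · rw [PySem.List.pyRange_one_eq_nil (by omega)]
    simp
  · have := main_loop nums (nums.length - 2) 1 0 (le_refl 1) (by omega)
    simpa using this

-- ---------- characterizing pvSuf (suffix minima) ----------

lemma headD_eq_getD {α : Type} (l : List α) (d : α) : l.headD d = l.getD 0 d := by
  cases l <;> simp

lemma pyGetD_neg_one (nums : List Int) (h : nums ≠ []) :
    PySem.List.pyGetD nums (-1) 0 = nums.getD (nums.length - 1) 0 := by
  have hn : 0 < nums.length := List.length_pos_of_ne_nil h
  have h1 : ¬((0:Int) ≤ -1) := by omega
  have h2 : -(nums.length : Int) ≤ -1 := by omega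
  simp only [PySem.List.pyGetD, PySem.List.pyGet?, PySem.List.pyIdx?, if_neg h1, if_pos h2]
  simp [List.getD_eq_getElem?_getD]

lemma pyGetD_neg_one_cons (x : Int) (t : List Int) (h : t ≠ []) :
    PySem.List.pyGetD (x :: t) (-1) 0 = PySem.List.pyGetD t (-1) 0 := by
  have ht : 0 < t.length := List.length_pos_of_ne_nil h
  rw [pyGetD_neg_one _ (by simp), pyGetD_neg_one _ h]
  have : (x :: t).length - 1 = (t.length - 1) + 1 := by simp; omega
  rw [this, List.getD_cons_succ]

lemma pvSuf_cons (x : Int) (t : List Int) (h : t ≠ []) :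
    pvSuf (x :: t) = min ((pvSuf t).headD 0) x :: pvSuf t := by
  unfold pvSuf
  rw [PySem.List.slice_to_neg_one, PySem.List.slice_to_neg_one,
      List.dropLast_cons_of_ne_nil h, List.reverse_cons, List.foldl_append,
      pyGetD_neg_one_cons x t h]
  simp

lemma pvSuf_singleton (a : Int) : pvSuf [a] = [a] := by
  unfold pvSuf
  rw [PySem.List.slice_to_neg_one]
  simp [pyGetD_neg_one]

lemma pvSuf_last (nums : List Int) (h : nums ≠ []) :
    (pvSuf nums).getD (nums.length - 1) 0 = nums.getD (nums.length - 1) 0 := by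
  induction nums with
  | nil => exact absurd rfl h
  | cons x t ih =>
    rcases eq_or_ne t [] with ht | ht
    · subst ht; rw [pvSuf_singleton]
    · have hl : (x :: t).length - 1 = (t.length - 1) + 1 := by
        have := List.length_pos_of_ne_nil ht; simp; omega
      rw [pvSuf_cons x t ht, hl, List.getD_cons_succ, List.getD_cons_succ]
      exact ih ht

lemma pvSuf_rec (nums : List Int) :
    ∀ (j : Nat), j + 1 < nums.length →
      (pvSuf nums).getD j 0 = min ((pvSuf nums).getD (j + 1) 0) (nums.getD j 0) := by
  induction nums with
  | nil => intro j hj; simp at hj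
  | cons x t ih =>
    intro j hj
    have ht : t ≠ [] := by
      intro he; subst he; simp at hj
    rw [pvSuf_cons x t ht]
    cases j with
    | zero =>
      rw [List.getD_cons_zero, List.getD_cons_succ, List.getD_cons_zero,
          headD_eq_getD, min_comm]
    | succ j =>
      rw [List.getD_cons_succ, List.getD_cons_succ, List.getD_cons_succ]
      exact ih j (by simpa using hj)

lemma pvSuf_le (nums : List Int) (h : nums ≠ []) (j : Nat) (hj : j < nums.length) :
    (pvSuf nums).getD j 0 ≤ nums.getD j 0 := by
  rcases Nat.lt_or_ge (j + 1) nums.length with h1 | h1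
  · rw [pvSuf_rec nums j h1]
    exact min_le_right _ _
  · have : j = nums.length - 1 := by omega
    subst this
    rw [pvSuf_last nums h]

lemma pvLeft_ge (nums : List Int) (j : Nat) (hj : j < nums.length) :
    nums.getD j 0 ≤ (pvLeft nums).getD j 0 := by
  cases j with
  | zero => rw [pvLeft_getD_zero]
  | succ j =>
    rw [pvLeft_getD_succ nums j hj]
    exact le_max_right _ _

-- the 2/1/0 branch splits into the two indicator counts
lemma pvTerm_split (nums : List Int) (i : Int) (h1 : 1 ≤ i)
    (h2 : i < (nums.length : Int) - 1) :
    pvTerm nums i = pvLocal nums i + pvGlob nums i := by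
  have hn : nums ≠ [] := by intro he; subst he; simp at h2; omega
  unfold pvTerm pvLocal pvGlob
  rw [PySem.List.pyGetD_of_nonneg (pvLeft nums) 0 (by omega : (0:Int) ≤ i - 1),
      PySem.List.pyGetD_of_nonneg nums 0 (by omega : (0:Int) ≤ i - 1),
      PySem.List.pyGetD_of_nonneg nums 0 (by omega : (0:Int) ≤ i),
      PySem.List.pyGetD_of_nonneg nums 0 (by omega : (0:Int) ≤ i + 1),
      PySem.List.pyGetD_of_nonneg (pvSuf nums) 0 (by omega : (0:Int) ≤ i + 1)]
  have himp :
      (pvLeft nums).getD (i - 1).toNat 0 < nums.getD i.toNat 0 ∧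
        nums.getD i.toNat 0 < (pvSuf nums).getD (i + 1).toNat 0 →
      nums.getD (i - 1).toNat 0 < nums.getD i.toNat 0 ∧
        nums.getD i.toNat 0 < nums.getD (i + 1).toNat 0 := by
    rintro ⟨hA, hB⟩
    constructor
    · exact lt_of_le_of_lt (pvLeft_ge nums (i - 1).toNat (by omega)) hA
    · exact lt_of_lt_of_le hB (pvSuf_le nums hn (i + 1).toNat (by omega))
  by_cases hg :
      (pvLeft nums).getD (i - 1).toNat 0 < nums.getD i.toNat 0 ∧
        nums.getD i.toNat 0 < (pvSuf nums).getD (i + 1).toNat 0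
  · rw [if_pos hg, if_pos hg, if_pos (himp hg)]
    norm_num
  · rw [if_neg hg, if_neg hg]
    split_ifs <;> ring

-- ---------- B side ----------

lemma foldl_if_one {α : Type} (p : α → Prop) [DecidablePred p] :
    ∀ (l : List α) (a : Int),
      l.foldl (fun acc t => if p t then acc + 1 else acc) a
        = a + (l.map (fun t => if p t then (1:Int) else 0)).sum := by
  intro l
  induction l with
  | nil => intro a; simp
  | cons x t ih =>
    intro a
    simp only [List.foldl_cons, List.map_cons, List.sum_cons, ih]
    split_ifs <;> ring

lemma local_sum (nums : List Int) :
    (nums.zip ((PySem.List.slice nums (some 1) none).zip (PySem.List.slice nums (some 2) none))).foldl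
        (fun acc t => if t.1 < t.2.1 ∧ t.2.1 < t.2.2 then acc + 1 else acc) 0
      = ((PySem.List.pyRange 1 ((nums.length : Int) - 1) 1).map (pvLocal nums)).sum := by
  rw [PySem.List.slice_from_one, PySem.List.slice_from nums (by omega : (0:Int) ≤ 2),
      foldl_if_one (fun t : Int × Int × Int => t.1 < t.2.1 ∧ t.2.1 < t.2.2), zero_add]
  congr 1
  apply List.ext_getElem
  · simp [PySem.List.length_pyRange_one]
    omega
  · intro k hk1 hk2
    have hkn : k + 2 < nums.length := by
      simp at hk1; omega
    simp only [List.getElem_map, List.getElem_zip, PySem.List.getElem_pyRange_one,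
      List.getElem_tail, List.getElem_drop]
    unfold pvLocal
    rw [show (1 : Int) + (k : Nat) - 1 = ((k : Nat) : Int) by omega,
        show (1 : Int) + (k : Nat) = (((k + 1 : Nat)) : Int) by omega]
    rw [show ((( (k + 1 : Nat)) : Int)) + 1 = (((k + 2 : Nat)) : Int) by omega]
    rw [PySem.List.pyGetD_natCast, PySem.List.pyGetD_natCast, PySem.List.pyGetD_natCast,
        List.getD_eq_getElem nums 0 (by omega : k < nums.length),
        List.getD_eq_getElem nums 0 (by omega : k + 1 < nums.length),
        List.getD_eq_getElem nums 0 (by omega : k + 2 < nums.length)]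
    have h2k : 2 + k = k + 2 := by omega
    simp [h2k]

lemma flags_fold (t : List Int) :
    ∀ (acc : List Bool) (m : Int),
      (t.foldl (fun st x => (st.1 ++ [decide (st.2 < x)], max st.2 x)) (acc, m)).1
        = acc ++ (t.zip (List.scanl max m t)).map (fun p => decide (p.2 < p.1)) := by
  induction t with
  | nil => intro acc m; simp
  | cons x t ih =>
    intro acc m
    rw [List.foldl_cons, List.scanl_cons, List.zip_cons_cons, List.map_cons]
    rw [ih (acc ++ [decide (m < x)]) (max m x)]
    simp

lemma pvLeft_length (nums : List Int) (h : nums ≠ []) :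
    (pvLeft nums).length = nums.length := by
  have := List.length_pos_of_ne_nil h
  simp [pvLeft, List.length_scanl]
  omega

lemma flag_at (nums : List Int) (s : Int) (h1 : 1 ≤ s) (h2 : s < (nums.length : Int)) :
    PySem.List.pyGetD
        (((PySem.List.slice nums (some 1) none).foldl
            (fun st x => (st.1 ++ [decide (st.2 < x)], max st.2 x))
            ([false], PySem.List.pyGetD nums 0 0)).1) s false
      = decide (PySem.List.pyGetD (pvLeft nums) (s - 1) 0 < PySem.List.pyGetD nums s 0) := by
  have hn : nums ≠ [] := by intro he; subst he; simp at h2; omega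
  rw [PySem.List.slice_from_one, flags_fold]
  have hfl : List.scanl max (PySem.List.pyGetD nums 0 0) nums.tail = pvLeft nums := rfl
  rw [hfl, PySem.List.pyGetD_of_nonneg _ _ (by omega : (0:Int) ≤ s)]
  obtain ⟨j, hj⟩ : ∃ j, s.toNat = j + 1 := ⟨s.toNat - 1, by omega⟩
  have hjn : j + 1 < nums.length := by omega
  have hzlen : (nums.tail.zip (pvLeft nums)).length = nums.length - 1 := by
    simp [List.length_zip, pvLeft_length nums hn]
  rw [hj, List.singleton_append, List.getD_cons_succ,
      List.getD_eq_getElem _ _ (by simp [hzlen]; omega :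
        j < ((nums.tail.zip (pvLeft nums)).map (fun p => decide (p.2 < p.1))).length),
      List.getElem_map, List.getElem_zip, List.getElem_tail,
      PySem.List.pyGetD_of_nonneg _ _ (by omega : (0:Int) ≤ s - 1),
      PySem.List.pyGetD_of_nonneg _ _ (by omega : (0:Int) ≤ s)]
  have hj1 : (s - 1).toNat = j := by omega
  rw [hj1, hj,
      List.getD_eq_getElem (pvLeft nums) 0 (by rw [pvLeft_length nums hn]; omega),
      List.getD_eq_getElem nums 0 (by omega)]

lemma back_loop (nums : List Int) (h : nums ≠ []) :
    ∀ (k : Nat) (s g : Int), 1 ≤ s → s + k = (nums.length : Int) - 1 →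
      (((PySem.List.pyRange s ((nums.length : Int) - 1) 1).map
          (fun i => ((i : Int), PySem.List.pyGetD nums i 0))).foldr
        (fun p st =>
          (min st.1 p.2,
           if p.2 < st.1 ∧ PySem.List.pyGetD
               (((PySem.List.slice nums (some 1) none).foldl
                  (fun st x => (st.1 ++ [decide (st.2 < x)], max st.2 x))
                  ([false], PySem.List.pyGetD nums 0 0)).1) p.1 false = true
           then st.2 + 1 else st.2))
        (PySem.List.pyGetD nums (-1) 0, g))
      = (PySem.List.pyGetD (pvSuf nums) s 0,
         g + ((PySem.List.pyRange s ((nums.length : Int) - 1) 1).map (pvGlob nums)).sum) := by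
  intro k
  induction k with
  | zero =>
    intro s g hs hk
    rw [PySem.List.pyRange_one_eq_nil (by omega)]
    simp only [List.map_nil, List.foldr_nil, List.sum_nil, add_zero]
    rw [pyGetD_neg_one nums h, PySem.List.pyGetD_of_nonneg _ _ (by omega : (0:Int) ≤ s)]
    have hsn : s.toNat = nums.length - 1 := by omega
    rw [hsn, pvSuf_last nums h]
  | succ k ih =>
    intro s g hs hk
    have hslt : s < (nums.length : Int) - 1 := by omega
    rw [PySem.List.pyRange_one_cons hslt]
    simp only [List.map_cons, List.foldr_cons, List.sum_cons]
    rw [ih (s + 1) g (by omega) (by omega)]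
    have hrec : PySem.List.pyGetD (pvSuf nums) s 0
        = min (PySem.List.pyGetD (pvSuf nums) (s + 1) 0) (PySem.List.pyGetD nums s 0) := by
      rw [PySem.List.pyGetD_of_nonneg _ _ (by omega : (0:Int) ≤ s),
          PySem.List.pyGetD_of_nonneg _ _ (by omega : (0:Int) ≤ s + 1),
          PySem.List.pyGetD_of_nonneg _ _ (by omega : (0:Int) ≤ s)]
      have h1 : (s + 1).toNat = s.toNat + 1 := by omega
      rw [h1]
      exact pvSuf_rec nums s.toNat (by omega)
    rw [flag_at nums s hs (by omega)]
    rw [Prod.mk.injEq]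
    refine ⟨by rw [hrec], ?_⟩
    simp only [pvGlob, decide_eq_true_eq, and_comm]
    split_ifs <;> ring

lemma B_eq_sum (nums : List Int) (h : nums ≠ []) :
    sumOfBeauties_alt nums
      = ((PySem.List.pyRange 1 ((nums.length : Int) - 1) 1).map (pvLocal nums)).sum
        + ((PySem.List.pyRange 1 ((nums.length : Int) - 1) 1).map (pvGlob nums)).sum := by
  simp only [sumOfBeauties_alt]
  rw [local_sum nums]
  congr 1
  rw [pairs_eq nums h, List.foldl_reverse]
  rcases Nat.lt_or_ge nums.length 2 with h2 | h2
  · rw [PySem.List.pyRange_one_eq_nil (by omega)]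
    simp
  · rw [back_loop nums h (nums.length - 2) 1 0 (le_refl 1) (by omega)]
    simp

-- ===== VERDICT (by name: the statement is the Claim_ definition above) =====
theorem sumOfBeauties_spec : Claim_equal_sumOfBeauties := by
  intro nums _ hpre
  show sumOfBeauties nums = sumOfBeauties_alt nums
  rw [A_eq_sum nums hpre, B_eq_sum nums hpre]
  have hmap : (PySem.List.pyRange 1 ((nums.length : Int) - 1) 1).map (pvTerm nums)
      = (PySem.List.pyRange 1 ((nums.length : Int) - 1) 1).map
          (fun i => pvLocal nums i + pvGlob nums i) := by
    apply List.map_congr_left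
    intro i hi
    rw [PySem.List.mem_pyRange_one] at hi
    exact pvTerm_split nums i hi.1 hi.2
  rw [hmap, PySem.List.sum_map_add_int]
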